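-- pv_equiv track=rewrite | github.com/matyaslagos/analogy-based-models-of-language | archive/text_import.py | phrases_listed
-- ===== SOURCE A (Python) =====
-- def phrases_listed(text):
--
--     phrases = []
--     current = []
--
--     for w in text:
--         if w == '>':
--             current.append('>')
--             phrases.append(current)
--             current = []
--         else:
--             current.append(w)
--
--     return phrases
-- ===== SOURCE B (Python) =====
-- def phrases_listed(text):
--     tokens = list(text)
--     cuts = [i for i, w in enumerate(tokens) if w == '>']
--     phrases = []
--     prev = 0
--     for c in cuts:
--         phrases.append(tokens[prev:c + 1])
--         prev = c + 1
--     return phrases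
-- ===== Notes on version B (the rewrite author's own statement) =====
-- stated objective: alternative
-- what changed: Replaces the incremental token-by-token accumulator with two passes: first collect the indices of '>' delimiters, then emit phrases as boundary-to-boundary slices of the token list.
import Mathlib
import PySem

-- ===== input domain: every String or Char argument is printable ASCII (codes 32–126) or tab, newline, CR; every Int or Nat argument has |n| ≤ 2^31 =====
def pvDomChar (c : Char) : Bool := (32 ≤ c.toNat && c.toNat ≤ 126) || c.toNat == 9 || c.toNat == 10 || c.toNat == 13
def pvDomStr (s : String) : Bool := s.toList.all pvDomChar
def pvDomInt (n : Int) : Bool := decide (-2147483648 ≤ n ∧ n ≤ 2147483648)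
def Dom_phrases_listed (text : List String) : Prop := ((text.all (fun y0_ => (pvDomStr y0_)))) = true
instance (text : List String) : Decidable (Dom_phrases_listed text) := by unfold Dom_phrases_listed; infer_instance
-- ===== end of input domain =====

-- B replaces A's incremental accumulator with a delimiter-index table and boundary slicing (alternative decomposition, same return value).

-- ===== PORT A =====
-- single pass, accumulating the current phrase and appending it at each '>'
def phrases_listed (text : List String) : List (List String) :=
  (text.foldl
    (fun (st : List (List String) × List String) w =>
      if w = ">" then (st.1 ++ [st.2 ++ [">"]], [])
      else (st.1, st.2 ++ [w]))
    ([], [])).1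

-- ===== PORT B =====
-- pass 1: cuts = indices of '>' tokens; pass 2: slice tokens from boundary to boundary
def phrases_listed_alt (text : List String) : List (List String) :=
  let tokens := text
  let cuts := ((PySem.List.enumerate tokens).filter (fun p => p.2 = ">")).map (·.1)
  (cuts.foldl
    (fun (st : List (List String) × Int) c =>
      (st.1 ++ [PySem.List.slice tokens (some st.2) (some (c + 1))], c + 1))
    ([], 0)).1

-- ===== PRECONDITION & SPEC =====
def Spec_phrases_listed (text : List String) (out : List (List String)) : Prop := out = phrases_listed_alt text
instance (text : List String) (out : List (List String)) : Decidable (Spec_phrases_listed text out) := by unfold Spec_phrases_listed; infer_instance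

-- ===== CLAIM (what is proved, stated in full; the proofs are below) =====
def Claim_equal_phrases_listed : Prop := ∀ (text : List String), Dom_phrases_listed text → Spec_phrases_listed text (phrases_listed text)

-- ===== LEMMAS AND PROOFS =====

/-- Shared characterization: phrases of `ws` given that `cur` has already been read. -/
def pvF (cur : List String) : List String → List (List String)
  | [] => []
  | w :: ws => if w = ">" then (cur ++ [">"]) :: pvF [] ws else pvF (cur ++ [w]) ws

theorem pvA_fold (ws : List String) (phrases : List (List String)) (cur : List String) :
    (ws.foldl
      (fun (st : List (List String) × List String) w =>
        if w = ">" then (st.1 ++ [st.2 ++ [">"]], [])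
        else (st.1, st.2 ++ [w]))
      (phrases, cur)).1 = phrases ++ pvF cur ws := by
  induction ws generalizing phrases cur with
  | nil => simp [pvF]
  | cons w ws ih =>
    by_cases h : w = ">" <;> simp [pvF, h, ih]

theorem pvB_fold (ws pre mid : List String) (out : List (List String)) :
    ((((PySem.List.enumerate ws ((pre.length + mid.length : Nat) : Int)).filter
        (fun p => p.2 = ">")).map (·.1)).foldl
      (fun (st : List (List String) × Int) c =>
        (st.1 ++ [PySem.List.slice (pre ++ mid ++ ws) (some st.2) (some (c + 1))], c + 1))
      (out, (pre.length : Int))).1 = out ++ pvF mid ws := by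
  induction ws generalizing pre mid out with
  | nil => simp [PySem.List.enumerate_nil, pvF]
  | cons w ws ih =>
    rw [PySem.List.enumerate_cons]
    by_cases h : w = ">"
    · subst h
      have hs : ((pre.length + mid.length : Nat) : Int) + 1
          = (((pre ++ mid ++ [">"]).length + ([] : List String).length : Nat) : Int) := by
        push_cast; simp; ring
      have hsl : PySem.List.slice (pre ++ mid ++ ">" :: ws) (some (pre.length : Int))
          (some (((pre.length + mid.length : Nat) : Int) + 1)) = mid ++ [">"] := by
        have : ((pre.length + mid.length : Nat) : Int) + 1
            = ((pre.length + (mid.length + 1) : Nat) : Int) := by push_cast; ring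
        rw [this, PySem.List.slice_natCast]
        have hd : (pre ++ mid ++ ">" :: ws).drop pre.length = mid ++ ">" :: ws := by
          rw [List.append_assoc]; exact List.drop_left ..
        rw [hd]
        have ht : pre.length + (mid.length + 1) - pre.length = mid.length + 1 := by omega
        rw [ht]
        rw [show mid ++ ">" :: ws = (mid ++ [">"]) ++ ws by simp]
        rw [show mid.length + 1 = (mid ++ [">"]).length by simp]
        exact List.take_left ..
      simp only [List.filter_cons, if_true,
        decide_true, List.map_cons, List.foldl_cons]
      rw [hsl, hs]
      have harr : pre ++ mid ++ ">" :: ws = (pre ++ mid ++ [">"]) ++ [] ++ ws := by simp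
      rw [harr]
      rw [show ((pre ++ mid ++ [">"]).length + ([] : List String).length)
          = (pre ++ mid ++ [">"]).length from by simp]
      have h2 := ih (pre ++ mid ++ [">"]) [] (out ++ [mid ++ [">"]])
      simp only [List.length_nil, Nat.add_zero] at h2
      rw [h2]
      simp [pvF]
    · have hfil : (fun (p : Int × String) => decide (p.2 = ">"))
          (((pre.length + mid.length : Nat) : Int), w) = false := by
        simp [h]
      simp only [List.filter_cons, hfil, Bool.false_eq_true, if_false]
      have hs : ((pre.length + mid.length : Nat) : Int) + 1
          = ((pre.length + (mid ++ [w]).length : Nat) : Int) := by push_cast; simp; ring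
      have harr : pre ++ mid ++ w :: ws = pre ++ (mid ++ [w]) ++ ws := by simp
      rw [hs, harr, ih pre (mid ++ [w]) out]
      simp [pvF, h]

-- ===== VERDICT (by name: the statement is the Claim_ definition above) =====
theorem phrases_listed_spec : Claim_equal_phrases_listed := by
  intro text _
  unfold Spec_phrases_listed phrases_listed phrases_listed_alt
  rw [pvA_fold]
  have := pvB_fold text [] [] []
  simpa [PySem.List.enumerate] using this.symm
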